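-- pv_equiv track=rewrite | github.com/MalliKarjun008/python-coding-challenges | challenge_37_number_sequence_pattern.py | number_increasing_pattern
-- ===== SOURCE A (Python) =====
-- def number_increasing_pattern(n):
--     if not isinstance(n, int) or n <= 0:
--         raise ValueError("Input must be a positive integer.")
--     pattern = []
--     for i in range(1, n + 1):
--         row = []
--         for j in range(1, i + 1):
--             row.append(str(j))
--         pattern.append(''.join(row))
--     return pattern
-- ===== SOURCE B (Python) =====
-- def number_increasing_pattern(n):
--     if not isinstance(n, int) or n <= 0:
--         raise ValueError("Input must be a positive integer.")
--     result = []
--     prefix = ""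
--     for i in range(1, n + 1):
--         prefix += str(i)
--         result.append(prefix)
--     return result
-- ===== Notes on version B (the rewrite author's own statement) =====
-- stated objective: faster
-- what changed: Replaces the nested rebuild-each-row loop with a single pass that extends one running prefix string and appends it to the result.
import Mathlib
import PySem

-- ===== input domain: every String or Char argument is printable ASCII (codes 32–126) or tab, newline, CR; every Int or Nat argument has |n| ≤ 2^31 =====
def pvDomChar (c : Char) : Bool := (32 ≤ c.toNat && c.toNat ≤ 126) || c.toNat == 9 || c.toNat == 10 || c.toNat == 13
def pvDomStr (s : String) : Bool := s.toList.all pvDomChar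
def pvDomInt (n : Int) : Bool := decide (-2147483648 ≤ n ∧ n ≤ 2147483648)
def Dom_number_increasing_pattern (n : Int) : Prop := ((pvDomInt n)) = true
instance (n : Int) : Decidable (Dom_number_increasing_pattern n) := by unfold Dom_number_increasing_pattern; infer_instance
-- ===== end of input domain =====

-- B replaces A's per-row rebuild (nested loop) with a single pass maintaining one running prefix string; faster by a constant/asymptotic append-count mechanism.

-- ===== PORT A =====
-- for i in 1..n: row = []; for j in 1..i: row.append(str(j)); pattern.append(''.join(row))
def number_increasing_pattern (n : Int) : List String :=
  (PySem.List.pyRange 1 (n + 1) 1).foldl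
    (fun pattern i =>
      let row := (PySem.List.pyRange 1 (i + 1) 1).foldl
        (fun r j => r ++ [PySem.Int.toStr j]) []
      pattern ++ [PySem.Str.join "" row]) []

-- ===== PORT B =====
-- single pass: prefix += str(i); result.append(prefix)
def number_increasing_pattern_alt (n : Int) : List String :=
  ((PySem.List.pyRange 1 (n + 1) 1).foldl
    (fun (st : List String × String) i =>
      let p := st.2 ++ PySem.Int.toStr i
      (st.1 ++ [p], p)) ([], "")).1

-- ===== PRECONDITION & SPEC =====
-- A raises ValueError on non-positive input; Pre_ admits exactly the positive integers.
def Pre_number_increasing_pattern (n : Int) : Prop := 1 ≤ n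
instance (n : Int) : Decidable (Pre_number_increasing_pattern n) := by unfold Pre_number_increasing_pattern; infer_instance
def pvWitness_number_increasing_pattern : Int := (3)

def Spec_number_increasing_pattern (n : Int) (out : List String) : Prop := out = number_increasing_pattern_alt n
instance (n : Int) (out : List String) : Decidable (Spec_number_increasing_pattern n out) := by unfold Spec_number_increasing_pattern; infer_instance

-- ===== CLAIM (what is proved, stated in full; the proofs are below) =====
def Claim_equal_number_increasing_pattern : Prop := ∀ (n : Int), Dom_number_increasing_pattern n → Pre_number_increasing_pattern n → Spec_number_increasing_pattern n (number_increasing_pattern n)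

-- ===== LEMMAS AND PROOFS =====

-- folding "append one element" is map
theorem pv_foldl_append_map {α β : Type} (f : α → β) :
    ∀ (l : List α) (acc : List β), l.foldl (fun r j => r ++ [f j]) acc = acc ++ l.map f := by
  intro l
  induction l with
  | nil => simp
  | cons a t ih => intro acc; simp [ih]

-- join with empty separator distributes over a snoc (Chars level)
theorem pv_chars_join_snoc :
    ∀ (l : List (List Char)) (x : List Char),
      PySem.Chars.join [] (l ++ [x]) = PySem.Chars.join [] l ++ x := by
  intro l
  induction l with
  | nil => intro x; simp [PySem.Chars.join_nil, PySem.Chars.join_singleton]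
  | cons a t ih =>
    intro x
    cases t with
    | nil => simp [PySem.Chars.join_singleton, PySem.Chars.join_cons_cons]
    | cons b u =>
      have h1 := PySem.Chars.join_cons_cons ([] : List Char) a b (u ++ [x])
      have h2 := PySem.Chars.join_cons_cons ([] : List Char) a b u
      simp only [List.cons_append] at *
      rw [h1, h2, ih x]
      simp

-- join with empty separator distributes over a snoc (String level)
theorem pv_str_join_snoc (l : List String) (x : String) :
    PySem.Str.join "" (l ++ [x]) = PySem.Str.join "" l ++ x := by
  apply String.toList_injective
  simp [PySem.Str.toList_join, pv_chars_join_snoc]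

-- the string of digits 1..i
def pvPref (i : Int) : String :=
  PySem.Str.join "" ((PySem.List.pyRange 1 (i + 1) 1).map PySem.Int.toStr)

theorem pvPref_succ (m : Nat) :
    pvPref ((m : Int) + 1) = pvPref m ++ PySem.Int.toStr ((m : Int) + 1) := by
  unfold pvPref
  rw [PySem.List.pyRange_one_succ_right (by omega : (1:Int) ≤ (m : Int) + 1)]
  rw [List.map_append, List.map_singleton, pv_str_join_snoc]

-- A's outer loop produces exactly the list of prefixes
theorem pv_A_eq_map (n : Int) :
    number_increasing_pattern n = (PySem.List.pyRange 1 (n + 1) 1).map pvPref := by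
  unfold number_increasing_pattern
  rw [pv_foldl_append_map (fun i => PySem.Str.join ""
        ((PySem.List.pyRange 1 (i + 1) 1).foldl (fun r j => r ++ [PySem.Int.toStr j]) []))]
  simp only [List.nil_append]
  apply List.map_congr_left
  intro i _
  rw [pv_foldl_append_map PySem.Int.toStr]
  simp [pvPref]

-- B's loop invariant: after processing 1..m, the state is (map of prefixes, prefix of m)
theorem pv_B_inv (m : Nat) :
    (PySem.List.pyRange 1 ((m : Int) + 1) 1).foldl
      (fun (st : List String × String) i =>
        let p := st.2 ++ PySem.Int.toStr i
        (st.1 ++ [p], p)) ([], "")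
    = ((PySem.List.pyRange 1 ((m : Int) + 1) 1).map pvPref, pvPref (m : Int)) := by
  induction m with
  | zero =>
    simp only [Nat.cast_zero, zero_add]
    rw [PySem.List.pyRange_one_eq_nil (by omega)]
    simp only [List.foldl_nil, List.map_nil]
    have : pvPref 0 = "" := by
      unfold pvPref
      rw [PySem.List.pyRange_one_eq_nil (by omega)]
      apply String.toList_injective
      simp [PySem.Str.toList_join, PySem.Chars.join_nil]
    rw [this]
  | succ k ih =>
    have hsplit : PySem.List.pyRange 1 ((↑(k + 1) : Int) + 1) 1
        = PySem.List.pyRange 1 ((k : Int) + 1) 1 ++ [(k : Int) + 1] := by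
      have := PySem.List.pyRange_one_succ_right (a := 1) (b := (k : Int) + 1) (by omega)
      push_cast
      convert this using 3
    rw [hsplit, List.foldl_append, ih]
    simp only [List.foldl_cons, List.foldl_nil, List.map_append, List.map_singleton]
    have h := pvPref_succ k
    push_cast
    rw [h]

theorem pv_AB (n : Int) (hn : 1 ≤ n) :
    number_increasing_pattern n = number_increasing_pattern_alt n := by
  unfold number_increasing_pattern_alt
  obtain ⟨m, rfl⟩ : ∃ m : Nat, n = (m : Int) := ⟨n.toNat, by omega⟩
  rw [pv_B_inv m, pv_A_eq_map]

-- ===== VERDICT (by name: the statement is the Claim_ definition above) =====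
theorem number_increasing_pattern_spec : Claim_equal_number_increasing_pattern := by
  intro n _ hpre
  unfold Spec_number_increasing_pattern
  exact pv_AB n hpre
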